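-- pv_equiv track=rewrite | github.com/mel805/Bag-bot | purge_bot_data.py | _redact_secret
-- ===== SOURCE A (Python) =====
-- def _redact_secret(text: str) -> str:
--     # Redact password between : and @ in connection strings
--     out = []
--     i = 0
--     while i < len(text):
--         colon = text.find(":", i)
--         at = text.find("@", i)
--         if colon == -1 or at == -1 or at < colon:
--             out.append(text[i:])
--             break
--         out.append(text[i:colon + 1])
--         out.append("***")
--         i = at
--     return "".join(out)
-- ===== SOURCE B (Python) =====
-- def _redact_secret(text: str) -> str:
--     colon = text.find(":")
--     at = text.find("@")
--     if colon == -1 or at == -1 or at < colon: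
--         return text
--     return text[:colon + 1] + "***" + text[at:]
-- ===== Notes on version B (the rewrite author's own statement) =====
-- stated objective: simpler
-- what changed: B replaces A's while-loop with incremental scan positions and an output-fragment accumulator by a single closed-form expression: two find() calls and one slice concatenation, exploiting the proved fact that A's loop never performs more than one redaction.
import Mathlib
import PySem

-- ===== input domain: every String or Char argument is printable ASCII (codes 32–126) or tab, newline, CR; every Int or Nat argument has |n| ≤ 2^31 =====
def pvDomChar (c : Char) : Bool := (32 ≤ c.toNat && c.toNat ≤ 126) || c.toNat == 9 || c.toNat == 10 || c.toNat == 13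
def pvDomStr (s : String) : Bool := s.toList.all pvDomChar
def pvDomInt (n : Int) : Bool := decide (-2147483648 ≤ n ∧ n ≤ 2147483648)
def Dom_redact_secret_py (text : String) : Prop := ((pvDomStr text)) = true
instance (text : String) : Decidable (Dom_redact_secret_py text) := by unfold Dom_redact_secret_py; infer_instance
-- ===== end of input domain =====

-- B replaces A's while-loop (scan position + fragment accumulator) by one closed-form
-- expression with two find() calls and a slice concatenation; same cost, simpler.

-- ===== PORT A =====
-- A's while-loop; terminates because the scan position i strictly increases (i := at > i).
def redactLoopA (cs : List Char) (i : Nat) (out : List (List Char)) : List (List Char) :=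
  if hi : i < cs.length then
    let colon := PySem.Chars.findFrom cs [':'] (i : Int)
    let a_ := PySem.Chars.findFrom cs ['@'] (i : Int)
    if hbr : colon = -1 ∨ a_ = -1 ∨ a_ < colon then
      out ++ [PySem.List.slice cs (some (i : Int)) none]
    else
      redactLoopA cs a_.toNat
        (out ++ [PySem.List.slice cs (some (i : Int)) (some (colon + 1)), "***".toList])
  else out
  termination_by cs.length - i
  decreasing_by
    push_neg at hbr
    obtain ⟨h1, h2, h3⟩ := hbr
    have hk : i ≤ cs.length := Nat.le_of_lt hi
    obtain ⟨hic, hpc, -⟩ := PySem.Chars.findFrom_natCast_spec cs [':'] i hk h1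
    obtain ⟨hia, hpa, -⟩ := PySem.Chars.findFrom_natCast_spec cs ['@'] i hk h2
    have hlt : i < (PySem.Chars.findFrom cs ['@'] (i : Int)).toNat := by
      rcases Nat.lt_or_ge i (PySem.Chars.findFrom cs ['@'] (i : Int)).toNat with h | h
      · exact h
      · exfalso
        have hce : (PySem.Chars.findFrom cs [':'] (i : Int)).toNat = i := by omega
        have hae : (PySem.Chars.findFrom cs ['@'] (i : Int)).toNat = i := by omega
        rw [hce] at hpc; rw [hae] at hpa
        obtain ⟨t1, e1⟩ := hpc
        obtain ⟨t2, e2⟩ := hpa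
        rw [← e1] at e2
        simp at e2
    omega

def redact_secret_py (text : String) : String :=
  String.ofList (PySem.Chars.join [] (redactLoopA text.toList 0 []))

-- ===== PORT B =====
def redact_secret_py_alt (text : String) : String :=
  if PySem.Chars.find text.toList [':'] = -1 ∨ PySem.Chars.find text.toList ['@'] = -1 ∨
     PySem.Chars.find text.toList ['@'] < PySem.Chars.find text.toList [':'] then text
  else String.ofList (PySem.List.slice text.toList none (some (PySem.Chars.find text.toList [':'] + 1)) ++
                      "***".toList ++
                      PySem.List.slice text.toList (some (PySem.Chars.find text.toList ['@'])) none)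

-- ===== PRECONDITION & SPEC =====
def Spec_redact_secret_py (text : String) (out : String) : Prop := out = redact_secret_py_alt text
instance (text : String) (out : String) : Decidable (Spec_redact_secret_py text out) := by unfold Spec_redact_secret_py; infer_instance

-- ===== CLAIM (what is proved, stated in full; the proofs are below) =====
def Claim_equal_redact_secret_py : Prop := ∀ (text : String), Dom_redact_secret_py text → Spec_redact_secret_py text (redact_secret_py text)

-- ===== LEMMAS AND PROOFS =====

lemma join_nil_three (x y z : List Char) :
    PySem.Chars.join [] [x, y, z] = x ++ y ++ z := by
  simp [PySem.Chars.join, List.intercalate, List.intersperse]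

lemma find_eq_zero_of_prefix (s sub : List Char) (h : sub <+: s) :
    PySem.Chars.find s sub = 0 := by
  have h0 : 0 ≤ PySem.Chars.find s sub :=
    (PySem.Chars.find_nonneg_iff s sub).2 h.isInfix
  obtain ⟨-, hmin⟩ := PySem.Chars.find_spec h0
  by_contra hne
  have : 0 < (PySem.Chars.find s sub).toNat := by omega
  exact hmin 0 this (by simpa using h)

-- the heart of the equivalence: A's loop, started at 0, joins to B's closed form
lemma loopA_join (cs : List Char) :
    PySem.Chars.join [] (redactLoopA cs 0 []) =
      (if PySem.Chars.find cs [':'] = -1 ∨ PySem.Chars.find cs ['@'] = -1 ∨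
          PySem.Chars.find cs ['@'] < PySem.Chars.find cs [':'] then cs
       else cs.take (PySem.Chars.find cs [':'] + 1).toNat ++ "***".toList ++
            cs.drop (PySem.Chars.find cs ['@']).toNat) := by
  by_cases h0 : 0 < cs.length
  · rw [redactLoopA]
    simp only [h0, dif_pos]
    have hz : ((0 : Nat) : Int) = (0 : Int) := rfl
    rw [hz, PySem.Chars.findFrom_zero, PySem.Chars.findFrom_zero]
    set c := PySem.Chars.find cs [':'] with hc
    set a := PySem.Chars.find cs ['@'] with ha
    by_cases hbr : c = -1 ∨ a = -1 ∨ a < c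
    · rw [dif_pos hbr, if_pos hbr]
      simp [PySem.List.slice_none_none]
    · rw [dif_neg hbr, if_neg hbr]
      push_neg at hbr
      obtain ⟨hcne, hane, hca⟩ := hbr
      have hc0 : 0 ≤ c := by have := PySem.Chars.neg_one_le_find cs [':']; omega
      have ha0 : 0 ≤ a := by have := PySem.Chars.neg_one_le_find cs ['@']; omega
      obtain ⟨hpa, -⟩ := PySem.Chars.find_spec (s := cs) (sub := ['@']) ha0
      obtain ⟨ta, ea⟩ := hpa
      have halen : a.toNat < cs.length := by
        have h := congrArg List.length ea
        simp at h; omega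
      -- second loop iteration
      rw [redactLoopA]
      simp only [halen, dif_pos]
      have hk2 : a.toNat ≤ cs.length := Nat.le_of_lt halen
      have hfa : PySem.Chars.find (cs.drop a.toNat) ['@'] = 0 :=
        find_eq_zero_of_prefix _ _ ⟨ta, ea⟩
      rw [PySem.Chars.findFrom_natCast cs [':'] a.toNat hk2,
          PySem.Chars.findFrom_natCast cs ['@'] a.toNat hk2, hfa]
      set f := PySem.Chars.find (cs.drop a.toNat) [':'] with hfdef
      have hfne : f ≠ 0 := by
        intro h
        obtain ⟨hpc, -⟩ := PySem.Chars.find_spec (s := cs.drop a.toNat) (sub := [':'])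
          (by rw [← hfdef, h])
        rw [← hfdef, h] at hpc
        obtain ⟨tc, ec⟩ := hpc
        rw [← ea] at ec
        simp at ec
      have hfge : f = -1 ∨ 1 ≤ f := by
        have := PySem.Chars.neg_one_le_find (cs.drop a.toNat) [':']
        rw [← hfdef] at this; omega
      have hcond : (if f = -1 then (-1 : Int) else (a.toNat : Int) + f) = -1 ∨
          (if (0 : Int) = -1 then (-1 : Int) else (a.toNat : Int) + 0) = -1 ∨
          (if (0 : Int) = -1 then (-1 : Int) else (a.toNat : Int) + 0) <
            (if f = -1 then (-1 : Int) else (a.toNat : Int) + f) := by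
        rcases hfge with h | h
        · left; simp [h]
        · right; right
          have : f ≠ -1 := by omega
          simp [this]; omega
      rw [dif_pos hcond]
      simp only [List.nil_append, List.cons_append]
      rw [join_nil_three]
      have h1 : PySem.List.slice cs (some (0 : Int)) (some (c + 1)) =
          cs.take (c + 1).toNat := by
        rw [PySem.List.slice_zero_start, PySem.List.slice_to cs (by omega)]
      have h2 : PySem.List.slice cs (some ((a.toNat : Nat) : Int)) none =
          cs.drop a.toNat := PySem.List.slice_from_natCast cs a.toNat
      rw [h1, h2]
  · have hnil : cs = [] := by
      cases cs with
      | nil => rfl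
      | cons x xs => simp at h0
    subst hnil
    rw [redactLoopA]
    have : PySem.Chars.find ([] : List Char) [':'] = -1 :=
      (PySem.Chars.find_eq_neg_one_iff _ _).2 (by simp)
    simp [this, PySem.Chars.join_nil]

-- ===== VERDICT (by name: the statement is the Claim_ definition above) =====
theorem redact_secret_py_spec : Claim_equal_redact_secret_py := by
  unfold Claim_equal_redact_secret_py
  intro text _
  unfold Spec_redact_secret_py redact_secret_py redact_secret_py_alt
  rw [loopA_join]
  by_cases hbr : PySem.Chars.find text.toList [':'] = -1 ∨
      PySem.Chars.find text.toList ['@'] = -1 ∨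
      PySem.Chars.find text.toList ['@'] < PySem.Chars.find text.toList [':']
  · rw [if_pos hbr, if_pos hbr]; simp
  · rw [if_neg hbr, if_neg hbr]
    push_neg at hbr
    have ha0 : 0 ≤ PySem.Chars.find text.toList ['@'] := by
      have := PySem.Chars.neg_one_le_find text.toList ['@']; omega
    have hc1 : (0 : Int) ≤ PySem.Chars.find text.toList [':'] + 1 := by
      have := PySem.Chars.neg_one_le_find text.toList [':']; omega
    rw [PySem.List.slice_to text.toList hc1, PySem.List.slice_from text.toList ha0]
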